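-- pv_equiv track=rewrite | github.com/Valonyx/ai-factory-pipeline | factory/pipeline/s6_deploy.py | _extract_deploy_url
-- ===== SOURCE A (Python) =====
-- from typing import Optional
--
-- def _extract_deploy_url(stdout: str) -> Optional[str]:
--     """Extract deployment URL from command output."""
--     for line in stdout.split("\n"):
--         line = line.strip()
--         if "https://" in line:
--             # Find the URL
--             start = line.index("https://")
--             end = len(line)
--             for char_idx in range(start, len(line)):
--                 if line[char_idx] in (" ", "\t", "\n", '"', "'"):
--                     end = char_idx
--                     break
--             return line[start:end]
--     return None
-- ===== SOURCE B (Python) =====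
-- DELIMS = " \t\n\"'"
--
--
-- def _extract_deploy_url(stdout):
--     """Extract deployment URL from command output."""
--     for line in stdout.split("\n"):
--         line = line.strip()
--         i = line.find("https://")
--         if i != -1:
--             url = []
--             for ch in line[i:]:
--                 if ch in DELIMS:
--                     break
--                 url.append(ch)
--             return "".join(url)
--     return None
-- ===== Notes on version B (the rewrite author's own statement) =====
-- stated objective: simpler
-- what changed: Replaces A's in+index double substring scan and its index-range loop computing an end index for a slice with a single find per line followed by direct accumulation of URL characters up to the first delimiter.
import Mathlib
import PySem

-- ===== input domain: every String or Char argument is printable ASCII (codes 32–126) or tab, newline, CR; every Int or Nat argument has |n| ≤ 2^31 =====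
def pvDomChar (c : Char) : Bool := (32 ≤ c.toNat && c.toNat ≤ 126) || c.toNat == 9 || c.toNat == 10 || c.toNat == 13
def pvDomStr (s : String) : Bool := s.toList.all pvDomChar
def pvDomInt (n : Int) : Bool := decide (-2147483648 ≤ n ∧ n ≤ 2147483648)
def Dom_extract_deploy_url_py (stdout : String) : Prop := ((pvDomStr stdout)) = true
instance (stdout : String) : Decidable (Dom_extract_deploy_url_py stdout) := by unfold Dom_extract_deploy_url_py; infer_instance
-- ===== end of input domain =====

-- B replaces A's `in`+`index` double scan and its index-range loop computing an end
-- index for a slice by a single find per line and direct accumulation of URL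
-- characters up to the first delimiter (objective: simpler).

-- ===== PORT A =====
def pvUrlChars : List Char := "https://".toList

def pvIsDelim (c : Char) : Bool := c == ' ' || c == '\t' || c == '\n' || c == '"' || c == '\''

-- inner loop `for char_idx in range(start, len(line)): if line[char_idx] in (...): end = char_idx; break`
-- (the `none` branch is unreachable: every index of range(start, len(line)) is in bounds)
def pvScanEnd (t : List Char) (idxs : List Int) (endv : Int) : Int :=
  match idxs with
  | [] => endv
  | i :: rest =>
    match PySem.List.pyGet? t i with
    | none => endv
    | some c => if pvIsDelim c then i else pvScanEnd t rest endv

def pvLoopA : List (List Char) → Option String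
  | [] => none
  | l :: rest =>
    let t := PySem.Chars.strip l
    if PySem.Chars.isIn pvUrlChars t then
      -- line.index("https://") = find here, guarded by the `in` test above
      let start := PySem.Chars.find t pvUrlChars
      let e := pvScanEnd t (PySem.List.pyRange start (t.length : Int) 1) (t.length : Int)
      some (String.ofList (PySem.List.slice t (some start) (some e)))
    else pvLoopA rest

def extract_deploy_url_py (stdout : String) : Option String :=
  pvLoopA (PySem.Chars.splitOn stdout.toList ['\n'])

-- ===== PORT B =====
def pvTakeUntil : List Char → List Char
  | [] => []
  | c :: r => if pvIsDelim c then [] else c :: pvTakeUntil r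

def pvLoopB : List (List Char) → Option String
  | [] => none
  | l :: rest =>
    let t := PySem.Chars.strip l
    let i := PySem.Chars.find t pvUrlChars
    if i ≠ -1 then
      some (String.ofList (pvTakeUntil (PySem.List.slice t (some i) none)))
    else pvLoopB rest

def extract_deploy_url_py_alt (stdout : String) : Option String :=
  pvLoopB (PySem.Chars.splitOn stdout.toList ['\n'])

-- ===== PRECONDITION & SPEC =====
def Spec_extract_deploy_url_py (stdout : String) (out : Option String) : Prop := out = extract_deploy_url_py_alt stdout
instance (stdout : String) (out : Option String) : Decidable (Spec_extract_deploy_url_py stdout out) := by unfold Spec_extract_deploy_url_py; infer_instance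

-- ===== CLAIM (what is proved, stated in full; the proofs are below) =====
def Claim_equal_extract_deploy_url_py : Prop := ∀ (stdout : String), Dom_extract_deploy_url_py stdout → Spec_extract_deploy_url_py stdout (extract_deploy_url_py stdout)

-- ===== LEMMAS AND PROOFS =====

theorem pvTakeUntil_eq (u : List Char) : pvTakeUntil u = u.takeWhile (fun c => !pvIsDelim c) := by
  induction u with
  | nil => rfl
  | cons c r ih =>
    simp only [pvTakeUntil, List.takeWhile_cons]
    by_cases h : pvIsDelim c = true
    · simp [h]
    · simp only [Bool.not_eq_true] at h
      simp [h, ih]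

theorem pvTake_takeWhile (p : Char → Bool) (u : List Char) :
    u.take (u.takeWhile p).length = u.takeWhile p := by
  induction u with
  | nil => rfl
  | cons c r ih =>
    by_cases h : p c = true
    · simp [h, ih]
    · simp only [Bool.not_eq_true] at h
      simp [h]

theorem pvScanEnd_eq (t : List Char) (u : List Char) :
    ∀ (s : Nat), t.drop s = u → s ≤ t.length →
    pvScanEnd t (PySem.List.pyRange (s : Int) (t.length : Int) 1) (t.length : Int)
      = (s : Int) + ((u.takeWhile fun c => !pvIsDelim c).length : Int) := by
  induction u with
  | nil =>
    intro s hd hs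
    have hlen : t.length ≤ s := by
      simpa [List.drop_eq_nil_iff] using hd
    have hse : s = t.length := le_antisymm hs hlen
    subst hse
    rw [PySem.List.pyRange_one_eq_nil (by omega)]
    simp [pvScanEnd]
  | cons c r ih =>
    intro s hd hs
    have hlt : s < t.length := by
      by_contra h
      have : t.drop s = [] := by simp [List.drop_eq_nil_iff]; omega
      rw [this] at hd; exact (List.cons_ne_nil c r) hd.symm
    rw [PySem.List.pyRange_one_cons (by exact_mod_cast hlt)]
    have hget : t[s]? = some c := by
      have h0 : (t.drop s)[0]? = some c := by rw [hd]; rfl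
      simpa using h0
    simp only [pvScanEnd, PySem.List.pyGet?_natCast, hget]
    by_cases hc : pvIsDelim c = true
    · simp [hc]
    · simp only [Bool.not_eq_true] at hc
      have hd' : t.drop (s + 1) = r := by
        rw [← List.tail_drop, hd]
        rfl
      have hcast : ((s : Int) + 1) = ((s + 1 : Nat) : Int) := by push_cast; ring
      rw [hc, if_neg (by simp), hcast, ih (s + 1) hd' (by omega)]
      simp [hc]
      ring

theorem pvLine_eq (t : List Char) (h : 0 ≤ PySem.Chars.find t pvUrlChars) :
    PySem.List.slice t (some (PySem.Chars.find t pvUrlChars))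
      (some (pvScanEnd t (PySem.List.pyRange (PySem.Chars.find t pvUrlChars) (t.length : Int) 1) (t.length : Int)))
    = pvTakeUntil (PySem.List.slice t (some (PySem.Chars.find t pvUrlChars)) none) := by
  set i := PySem.Chars.find t pvUrlChars with hi
  have hieq : i = ((i.toNat : Nat) : Int) := (Int.toNat_of_nonneg h).symm
  have hsle : i.toNat ≤ t.length := by
    have := PySem.Chars.find_le_length t pvUrlChars
    omega
  rw [hieq, pvScanEnd_eq t (t.drop i.toNat) i.toNat rfl hsle,
    PySem.List.slice_natCast_add, PySem.List.slice_from_natCast,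
    pvTake_takeWhile, pvTakeUntil_eq]

theorem pvLoop_eq (ls : List (List Char)) : pvLoopA ls = pvLoopB ls := by
  induction ls with
  | nil => rfl
  | cons l rest ih =>
    simp only [pvLoopA, pvLoopB]
    by_cases hin : PySem.Chars.isIn pvUrlChars (PySem.Chars.strip l) = true
    · have hinf : pvUrlChars <:+: PySem.Chars.strip l :=
        (PySem.Chars.isIn_iff_infix _ _).mp hin
      have hfind : 0 ≤ PySem.Chars.find (PySem.Chars.strip l) pvUrlChars :=
        (PySem.Chars.find_nonneg_iff _ _).mpr hinf
      rw [if_pos hin, if_pos (by omega), pvLine_eq _ hfind]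
    · have hne : ¬ pvUrlChars <:+: PySem.Chars.strip l := by
        intro hc
        exact hin ((PySem.Chars.isIn_iff_infix _ _).mpr hc)
      have hfind : PySem.Chars.find (PySem.Chars.strip l) pvUrlChars = -1 :=
        (PySem.Chars.find_eq_neg_one_iff _ _).mpr hne
      rw [if_neg hin, if_neg (by omega), ih]

-- ===== VERDICT (by name: the statement is the Claim_ definition above) =====
theorem extract_deploy_url_py_spec : Claim_equal_extract_deploy_url_py := by
  intro stdout _
  unfold Spec_extract_deploy_url_py extract_deploy_url_py extract_deploy_url_py_alt
  exact pvLoop_eq _
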